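-- pv_equiv track=rewrite | github.com/tiagotouso/TALENTOS_HUMANOS | IMPORTEXTRATOR.py | layoutValorTabela
-- ===== SOURCE A (Python) =====
-- def divisorlinha(indice, txt):
--     '''
--     FUNÇÃO PARA FATIADA A LINHA
--     ENTRA
--         LINHA (TXT) E O INDICE (LISTA NÚMERICA)
--     SAI
--         LISTA (LIST) DA LINHA FATIADA
--     '''
--     axlinha = []
--     qtinicial = 0
--     qtfinal = 0
--     # LOOP NA VARIÁVEL INDICE PEGANDO O INÍCIO E FIM PARA FAZER O FATIAMENTO
--     for vl in indice:
--         qtfinal = vl + qtinicial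
--         # FATIA A LINHA E QUARDA A LISTA (LIST)
--         axlinha.append(str(txt[qtinicial: qtfinal]).strip())
--         qtinicial = qtfinal
--
--     return axlinha
--
-- def layoutValorTabela(layout, valores):
--     '''
--     FUNÇÃO TRANSFORMAR O LAYOUT (DIC) E OS DADOS (TXT) EM TABELA (LIST)
--     ENTRA
--         LAYOUT (DIC) E VALORES (TXT)
--     SAI
--         TABELA (LIST) SEM O TITULO NAS COLUNAS
--     '''
--     # PEGA OS VALORES (INT) DO LAYOUT
--     separador = list(layout.values())
--     tb = []
--     # LOOP NAS LINHAS ARQUIVO TXT (LIST)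
--     for linha in valores:
--         if len(linha) > 0:
--             # FATIAR AS LINHAS DO ARQUIVO CONFORME O LAYOUT
--             axlinha = divisorlinha(separador, linha)
--             tb.append(axlinha)
--
--     return tb
-- ===== SOURCE B (Python) =====
-- def layoutValorTabela(layout, valores):
--     # Column-major strategy: extract each fixed-width COLUMN across all
--     # non-empty lines first, then transpose the columns into rows.
--     lines = [linha for linha in valores if len(linha) > 0]
--     cols = []
--     start = 0
--     for w in layout.values():
--         end = start + w
--         cols.append([linha[start:end].strip() for linha in lines])
--         start = end
--     return [list(row) for row in zip(*cols)] if cols else [[] for _ in lines]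
-- ===== Notes on version B (the rewrite author's own statement) =====
-- stated objective: alternative
-- what changed: B traverses the data column-major: it extracts each fixed-width column across all non-empty lines first and then transposes the column lists into rows, whereas A walks row-major with a per-line helper that re-runs an accumulating-offset loop.
import Mathlib
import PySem

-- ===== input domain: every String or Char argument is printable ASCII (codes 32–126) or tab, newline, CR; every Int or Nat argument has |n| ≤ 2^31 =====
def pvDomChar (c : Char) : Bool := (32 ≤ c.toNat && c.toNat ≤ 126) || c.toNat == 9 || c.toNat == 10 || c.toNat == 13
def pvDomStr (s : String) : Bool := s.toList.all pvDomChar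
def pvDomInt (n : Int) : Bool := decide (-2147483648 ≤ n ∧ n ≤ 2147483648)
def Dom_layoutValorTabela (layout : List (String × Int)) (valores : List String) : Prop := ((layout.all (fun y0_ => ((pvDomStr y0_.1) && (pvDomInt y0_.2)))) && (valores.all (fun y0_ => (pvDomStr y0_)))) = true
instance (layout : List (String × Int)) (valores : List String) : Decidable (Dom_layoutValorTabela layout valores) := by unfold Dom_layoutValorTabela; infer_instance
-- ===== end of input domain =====

-- B is column-major: it extracts each fixed-width column across all non-empty lines
-- and transposes the columns into rows, instead of A's row-major per-line slicing helper
-- (objective: alternative traversal order; return value only, neither mutates arguments).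

-- ===== PORT A =====
-- port of divisorlinha: running offset pair, appending each stripped slice
def divisorlinha (indice : List Int) (txt : String) : List String :=
  (indice.foldl
    (fun (st : List String × Int) vl =>
      let qtfinal := vl + st.2
      (st.1 ++ [PySem.Str.strip (PySem.Str.slice txt (some st.2) (some qtfinal))], qtfinal))
    ([], 0)).1

def layoutValorTabela (layout : List (String × Int)) (valores : List String) : List (List String) :=
  let separador := layout.map (fun kv => kv.2)   -- list(layout.values())
  valores.foldl
    (fun tb linha =>
      if PySem.Str.len linha > 0 then tb ++ [divisorlinha separador linha] else tb)
    []

-- ===== PORT B =====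
-- zip(*cols): heads of all columns, then recurse on the tails; stops at the first empty list
def zipStar (cols : List (List String)) : List (List String) :=
  if h : cols ≠ [] ∧ cols.all (fun c => !c.isEmpty) then
    cols.map (fun c => c.headD "") :: zipStar (cols.map List.tail)
  else []
termination_by (cols.headD []).length
decreasing_by
  obtain ⟨hne, hall⟩ := h
  match cols, hne with
  | c :: rest, _ =>
    have hc : ¬ c.isEmpty := by
      have := List.all_eq_true.mp hall c (by simp)
      simpa using this
    have hcne : c ≠ [] := by simpa [List.isEmpty_iff] using hc
    simp only [List.attach_cons, List.map_cons, List.headD_cons]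
    have : c.tail.length = c.length - 1 := List.length_tail ..
    have hpos : 0 < c.length := List.length_pos_iff.mpr hcne
    omega

def layoutValorTabela_alt (layout : List (String × Int)) (valores : List String) : List (List String) :=
  let lines := valores.filter (fun linha => decide (PySem.Str.len linha > 0))
  let st := (layout.map (fun kv => kv.2)).foldl
    (fun (st : List (List String) × Int) w =>
      let e := st.2 + w
      (st.1 ++ [lines.map (fun linha => PySem.Str.strip (PySem.Str.slice linha (some st.2) (some e)))], e))
    ([], 0)
  let cols := st.1
  if cols.isEmpty then lines.map (fun _ => []) else zipStar cols

-- ===== PRECONDITION & SPEC =====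
def Spec_layoutValorTabela (layout : List (String × Int)) (valores : List String) (out : List (List String)) : Prop := out = layoutValorTabela_alt layout valores
instance (layout : List (String × Int)) (valores : List String) (out : List (List String)) : Decidable (Spec_layoutValorTabela layout valores out) := by unfold Spec_layoutValorTabela; infer_instance

-- ===== CLAIM (what is proved, stated in full; the proofs are below) =====
def Claim_equal_layoutValorTabela : Prop := ∀ (layout : List (String × Int)) (valores : List String), Dom_layoutValorTabela layout valores → Spec_layoutValorTabela layout valores (layoutValorTabela layout valores)

-- ===== LEMMAS AND PROOFS =====

-- reference spec: the (start, end) spans generated from offset s by the widths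
def spansFrom (s : Int) : List Int → List (Int × Int)
  | [] => []
  | v :: rest => (s, s + v) :: spansFrom (s + v) rest

theorem divFold_eq (indice : List Int) (txt : String) : ∀ (acc : List String) (s : Int),
    (indice.foldl
      (fun (st : List String × Int) vl =>
        let qtfinal := vl + st.2
        (st.1 ++ [PySem.Str.strip (PySem.Str.slice txt (some st.2) (some qtfinal))], qtfinal))
      (acc, s)).1
    = acc ++ (spansFrom s indice).map
        (fun ab => PySem.Str.strip (PySem.Str.slice txt (some ab.1) (some ab.2))) := by
  induction indice with
  | nil => intro acc s; simp [spansFrom]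
  | cons v rest ih =>
      intro acc s
      simp only [List.foldl_cons, spansFrom, List.map_cons]
      rw [show v + s = s + v from by ring, ih]
      simp

theorem divisorlinha_eq (indice : List Int) (txt : String) :
    divisorlinha indice txt
      = (spansFrom 0 indice).map
          (fun ab => PySem.Str.strip (PySem.Str.slice txt (some ab.1) (some ab.2))) := by
  simpa using divFold_eq indice txt [] 0

theorem outerFold_eq (valores : List String) (row : String → List String) :
    ∀ (acc : List (List String)),
    valores.foldl (fun tb linha => if PySem.Str.len linha > 0 then tb ++ [row linha] else tb) acc
      = acc ++ (valores.filter (fun linha => decide (PySem.Str.len linha > 0))).map row := by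
  induction valores with
  | nil => intro acc; simp
  | cons v rest ih =>
      intro acc
      rw [List.foldl_cons, List.filter_cons]
      by_cases h : PySem.Str.len v > 0
      · have h' : 0 < v.length := by simpa [PySem.Str.len, PySem.Chars.len] using h
        rw [if_pos h, ih]; simp [h']
      · have h' : ¬ 0 < v.length := by simpa [PySem.Str.len, PySem.Chars.len] using h
        rw [if_neg h, ih]; simp [h']

theorem colsFold_eq (ws : List Int) (lines : List String) : ∀ (acc : List (List String)) (s : Int),
    (ws.foldl
      (fun (st : List (List String) × Int) w =>
        let e := st.2 + w
        (st.1 ++ [lines.map (fun linha => PySem.Str.strip (PySem.Str.slice linha (some st.2) (some e)))], e))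
      (acc, s)).1
    = acc ++ (spansFrom s ws).map
        (fun ab => lines.map (fun linha => PySem.Str.strip (PySem.Str.slice linha (some ab.1) (some ab.2)))) := by
  induction ws with
  | nil => intro acc s; simp [spansFrom]
  | cons v rest ih =>
      intro acc s
      simp only [List.foldl_cons, spansFrom, List.map_cons]
      rw [ih]
      simp

-- transpose law: zip(*) of the column images is the row-major map (for a nonempty function list)
theorem zipStar_transpose (fs : List (String → String)) (hfs : fs ≠ []) :
    ∀ (xs : List String),
    zipStar (fs.map (fun f => xs.map f)) = xs.map (fun x => fs.map (fun f => f x)) := by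
  intro xs
  induction xs with
  | nil =>
      rw [zipStar]
      match fs, hfs with
      | f :: fs', _ => simp
  | cons x xs' ih =>
      rw [zipStar]
      rw [dif_pos ?_]
      · have h1 : (fs.map (fun f => (x :: xs').map f)).map (fun c => c.headD "")
            = fs.map (fun f => f x) := by
          simp [Function.comp]
        have h2 : (fs.map (fun f => (x :: xs').map f)).map List.tail
            = fs.map (fun f => xs'.map f) := by
          simp [Function.comp]
        rw [h1, h2, ih]
        simp
      · constructor
        · simpa using hfs
        · simp

theorem layoutValorTabela_alt_eq (layout : List (String × Int)) (valores : List String) :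
    layoutValorTabela_alt layout valores
      = (valores.filter (fun linha => decide (PySem.Str.len linha > 0))).map
          (fun linha => (spansFrom 0 (layout.map (fun kv => kv.2))).map
            (fun ab => PySem.Str.strip (PySem.Str.slice linha (some ab.1) (some ab.2)))) := by
  simp only [layoutValorTabela_alt]
  rw [colsFold_eq]
  simp only [List.nil_append]
  set lines := valores.filter (fun linha => decide (PySem.Str.len linha > 0)) with hlines
  set spans := spansFrom 0 (layout.map (fun kv => kv.2)) with hspans
  by_cases hsp : spans = []
  · simp [hsp]
  · have hne : (spans.map (fun ab => lines.map (fun linha => PySem.Str.strip (PySem.Str.slice linha (some ab.1) (some ab.2))))) ≠ [] := by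
      simpa using hsp
    rw [if_neg (by simpa using hne)]
    have := zipStar_transpose
      (spans.map (fun ab => fun linha => PySem.Str.strip (PySem.Str.slice linha (some ab.1) (some ab.2))))
      (by simpa using hsp) lines
    simpa [List.map_map, Function.comp] using this

-- ===== VERDICT (by name: the statement is the Claim_ definition above) =====
theorem layoutValorTabela_spec : Claim_equal_layoutValorTabela := by
  intro layout valores _
  unfold Spec_layoutValorTabela layoutValorTabela
  rw [outerFold_eq, layoutValorTabela_alt_eq]
  simp only [List.nil_append]
  congr 1
  funext linha
  exact divisorlinha_eq _ _
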